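-- pv_equiv track=rewrite | github.com/esun0087/euler | pe340.py | get_begin
-- ===== SOURCE A (Python) =====
-- def get_begin(iter_times):
--     this_begin = 14157885673
--     for i in range(iter_times):
--         if i % 10 == 9:
--             this_begin += 21290576220
--         else:
--             this_begin += 14193717480
--     return this_begin
-- ===== SOURCE B (Python) =====
-- def get_begin(iter_times):
--     n = max(iter_times, 0)
--     # n//10 iterations hit i % 10 == 9; the rest add the smaller increment.
--     return 14157885673 + n * 14193717480 + (n // 10) * 7096858740
-- ===== Notes on version B (the rewrite author's own statement) =====
-- stated objective: faster
-- what changed: Replaced the O(n) loop with a closed form: n//10 indices satisfy i%10==9, so the sum is base + n*14193717480 + (n//10)*(21290576220-14193717480).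
import Mathlib
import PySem

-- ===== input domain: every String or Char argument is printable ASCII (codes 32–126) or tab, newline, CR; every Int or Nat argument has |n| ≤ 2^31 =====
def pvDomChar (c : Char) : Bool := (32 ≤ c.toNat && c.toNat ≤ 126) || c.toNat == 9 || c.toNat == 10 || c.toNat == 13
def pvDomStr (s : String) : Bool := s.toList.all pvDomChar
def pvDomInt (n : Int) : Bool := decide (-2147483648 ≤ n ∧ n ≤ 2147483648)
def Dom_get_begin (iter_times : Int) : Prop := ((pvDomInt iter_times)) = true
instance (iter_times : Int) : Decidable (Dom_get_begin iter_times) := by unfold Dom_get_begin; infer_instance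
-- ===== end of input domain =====

-- B replaces A's O(n) loop with the closed form base + n*14193717480 + (n//10)*7096858740.

-- ===== PORT A =====
def get_begin (iter_times : Int) : Int :=
  (PySem.List.pyRange 0 iter_times 1).foldl
    (fun this_begin i =>
      if PySem.Int.mod i 10 = 9 then this_begin + 21290576220
      else this_begin + 14193717480)
    14157885673

-- ===== PORT B =====
def get_begin_alt (iter_times : Int) : Int :=
  let n := max iter_times 0
  14157885673 + n * 14193717480 + PySem.Int.floordiv n 10 * 7096858740

-- ===== PRECONDITION & SPEC =====
def Spec_get_begin (iter_times : Int) (out : Int) : Prop := out = get_begin_alt iter_times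
instance (iter_times : Int) (out : Int) : Decidable (Spec_get_begin iter_times out) := by unfold Spec_get_begin; infer_instance

-- ===== CLAIM (what is proved, stated in full; the proofs are below) =====
def Claim_equal_get_begin : Prop := ∀ (iter_times : Int), Dom_get_begin iter_times → Spec_get_begin iter_times (get_begin iter_times)

-- ===== LEMMAS AND PROOFS =====

lemma get_begin_loop (m : Nat) :
    (PySem.List.pyRange 0 (m : Int) 1).foldl
      (fun this_begin i =>
        if PySem.Int.mod i 10 = 9 then this_begin + 21290576220
        else this_begin + 14193717480)
      14157885673
    = 14157885673 + (m : Int) * 14193717480 + ((m / 10 : Nat) : Int) * 7096858740 := by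
  induction m with
  | zero => simp [PySem.List.pyRange_one_eq_nil]
  | succ k ih =>
      have h : ((k : Int) + 1) = ((k + 1 : Nat) : Int) := by push_cast; ring
      rw [show ((k + 1 : Nat) : Int) = (k : Int) + 1 by push_cast; ring,
          PySem.List.pyRange_one_succ_right (by positivity),
          List.foldl_append, ih]
      simp only [List.foldl]
      have hmod : PySem.Int.mod (k : Int) 10 = ((k % 10 : Nat) : Int) :=
        PySem.Int.mod_natCast k 10
      by_cases hk : k % 10 = 9
      · have hdiv : (k + 1) / 10 = k / 10 + 1 := by omega
        rw [hmod, hk, hdiv]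
        norm_num
        ring
      · rw [hmod]
        have hne : ((k % 10 : Nat) : Int) ≠ 9 := by
          intro h'; exact hk (by exact_mod_cast h')
        have hdiv : (k + 1) / 10 = k / 10 := by omega
        simp only [if_neg hne]
        rw [hdiv]; push_cast; ring

-- ===== VERDICT (by name: the statement is the Claim_ definition above) =====
theorem get_begin_spec : Claim_equal_get_begin := by
  intro iter_times _
  unfold Spec_get_begin get_begin get_begin_alt
  by_cases h : iter_times ≤ 0
  · rw [PySem.List.pyRange_one_eq_nil h]
    have hmax : max iter_times 0 = 0 := by omega
    simp [hmax, PySem.Int.floordiv]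
  · obtain ⟨m, rfl⟩ : ∃ m : Nat, iter_times = (m : Int) :=
      ⟨iter_times.toNat, by omega⟩
    have hmax : max ((m : Int)) 0 = (m : Int) := max_eq_left (by positivity)
    have hfd : PySem.Int.floordiv (m : Int) 10 = ((m / 10 : Nat) : Int) := by
      exact_mod_cast PySem.Int.floordiv_natCast m 10
    rw [get_begin_loop m]
    simp only [hmax, hfd]
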